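-- pv_equiv track=rewrite | github.com/sotpapathe/advent-of-code-2024 | day2/day2.py | valid_seq2
-- ===== SOURCE A (Python) =====
-- def valid_seq2(c):
--     sign = None
--     num_inc_sign = 0
--     num_inc_abs = 0
--     for i in range(len(c) - 1):
--         d = c[i + 1] - c[i]
--         if abs(d) > 3 or d == 0:
--             num_inc_abs += 1
--             continue
--         if sign is None:
--             sign = d > 0
--         elif (d > 0) != sign:
--             num_inc_sign += 1
--     if num_inc_abs > 1:
--         return False
--     if num_inc_abs == 1 and num_inc_sign == 0:
--         return True
--     if num_inc_sign > 1 or num_inc_sign < len(c) - 1: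
--         return False
--     return True
-- ===== SOURCE B (Python) =====
-- def valid_seq2(c):
--     # Symmetric characterization: safe iff trivially short, or exactly one step is
--     # bad (zero or |step|>3) and the good steps do not go in both directions.
--     n = len(c)
--     if n <= 1:
--         return True
--     pairs = list(zip(c, c[1:]))
--     up = sum(1 for a, b in pairs if 1 <= b - a <= 3)
--     down = sum(1 for a, b in pairs if -3 <= b - a <= -1)
--     return up + down == n - 2 and (up == 0 or down == 0)
-- ===== Notes on version B (the rewrite author's own statement) =====
-- stated objective: alternative
-- what changed: A's stateful loop (optional first-good sign, mismatch counter relative to it, bad counter) plus the four-way decision cascade with the quirky 'num_inc_sign < len(c)-1' test is replaced by a symmetric characterization with no notion of a first/reference sign: count up-steps (1..3) and down-steps (-3..-1) over the pair list and return 'up+down == n-2 and (up == 0 or down == 0)' (trivially True for n<=1), proved to be the same predicate.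
import Mathlib
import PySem

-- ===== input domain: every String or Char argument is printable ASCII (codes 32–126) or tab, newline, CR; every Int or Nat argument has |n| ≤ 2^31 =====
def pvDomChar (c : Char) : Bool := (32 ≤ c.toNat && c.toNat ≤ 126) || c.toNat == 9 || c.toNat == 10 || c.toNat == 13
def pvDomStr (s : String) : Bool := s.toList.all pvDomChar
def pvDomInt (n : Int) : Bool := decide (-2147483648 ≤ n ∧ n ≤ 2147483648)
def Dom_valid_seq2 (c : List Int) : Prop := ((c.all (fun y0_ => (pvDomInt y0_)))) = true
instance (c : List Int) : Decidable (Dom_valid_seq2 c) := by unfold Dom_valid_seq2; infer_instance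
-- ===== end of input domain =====

-- B replaces A's stateful loop (first-good sign, mismatch counter, bad counter) and
-- four-way decision cascade by a symmetric count of up-steps and down-steps with a
-- direct two-condition test; objective: alternative characterization of the same predicate.

-- ===== PORT A =====
-- loop body of A's for-loop; the loop only visits i with 0 ≤ i and i + 1 < len(c),
-- so pyGetD with default 0 is exact for Python's c[i] / c[i+1] there.
def pvBodyA (c : List Int) (st : Option Bool × Int × Int) (i : Int) : Option Bool × Int × Int :=
  let d := PySem.List.pyGetD c (i + 1) 0 - PySem.List.pyGetD c i 0
  if 3 < d.natAbs ∨ d = 0 then (st.1, st.2.1, st.2.2 + 1)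
  else
    match st.1 with
    | none => (some (decide (0 < d)), st.2.1, st.2.2)
    | some s => if decide (0 < d) ≠ s then (st.1, st.2.1 + 1, st.2.2) else st

def valid_seq2 (c : List Int) : Bool :=
  -- state: (sign, num_inc_sign, num_inc_abs)
  let st := (PySem.List.pyRange 0 ((c.length : Int) - 1) 1).foldl (pvBodyA c) (none, 0, 0)
  if 1 < st.2.2 then false
  else if st.2.2 = 1 ∧ st.2.1 = 0 then true
  else if 1 < st.2.1 ∨ st.2.1 < (c.length : Int) - 1 then false
  else true

-- ===== PORT B =====
-- sum(1 for … if cond) over the pair list is List.countP of the condition.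
def valid_seq2_alt (c : List Int) : Bool :=
  if c.length ≤ 1 then true
  else
    let pairs := c.zip (PySem.List.slice c (some 1) none)
    let up : Int := pairs.countP (fun p => decide (1 ≤ p.2 - p.1 ∧ p.2 - p.1 ≤ 3))
    let down : Int := pairs.countP (fun p => decide (-3 ≤ p.2 - p.1 ∧ p.2 - p.1 ≤ -1))
    decide (up + down = (c.length : Int) - 2 ∧ (up = 0 ∨ down = 0))

-- ===== PRECONDITION & SPEC =====
def Spec_valid_seq2 (c : List Int) (out : Bool) : Prop := out = valid_seq2_alt c
instance (c : List Int) (out : Bool) : Decidable (Spec_valid_seq2 c out) := by unfold Spec_valid_seq2; infer_instance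

-- ===== CLAIM (what is proved, stated in full; the proofs are below) =====
def Claim_equal_valid_seq2 : Prop := ∀ (c : List Int), Dom_valid_seq2 c → Spec_valid_seq2 c (valid_seq2 c)

-- ===== LEMMAS AND PROOFS =====


def pvIsGood (d : Int) : Bool := decide (d ≠ 0 ∧ d.natAbs ≤ 3)

def pvUpP (d : Int) : Bool := decide (1 ≤ d ∧ d ≤ 3)
def pvDownP (d : Int) : Bool := decide (-3 ≤ d ∧ d ≤ -1)

-- A's loop body as a function of the difference alone
def pvStep (st : Option Bool × Int × Int) (d : Int) : Option Bool × Int × Int :=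
  if 3 < d.natAbs ∨ d = 0 then (st.1, st.2.1, st.2.2 + 1)
  else
    match st.1 with
    | none => (some (decide (0 < d)), st.2.1, st.2.2)
    | some s => if decide (0 < d) ≠ s then (st.1, st.2.1 + 1, st.2.2) else st

def pvDiffs (c : List Int) : List Int := (c.zip c.tail).map (fun p => p.2 - p.1)

lemma pvDiffs_eq_range_map (c : List Int) :
    pvDiffs c = (List.range (c.length - 1)).map
      (fun i : Nat => PySem.List.pyGetD c ((i : Int) + 1) 0 - PySem.List.pyGetD c (i : Int) 0) := by
  apply List.ext_getElem
  · simp [pvDiffs]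
  · intro i h1 h2
    have hi : i < c.length - 1 := by simp [pvDiffs] at h1; omega
    have h1' : i + 1 < c.length := by omega
    simp only [pvDiffs, List.getElem_map, List.getElem_zip, List.getElem_tail, List.getElem_range]
    have e1 : ((i : Int) + 1) = ((i + 1 : Nat) : Int) := by push_cast; ring
    rw [e1, PySem.List.pyGetD_natCast, PySem.List.pyGetD_natCast]
    rw [List.getD_eq_getElem _ _ h1', List.getD_eq_getElem _ _ (by omega)]

lemma pvFoldA_eq (c : List Int) (st : Option Bool × Int × Int) :
    (PySem.List.pyRange 0 ((c.length : Int) - 1) 1).foldl (pvBodyA c) st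
      = (pvDiffs c).foldl pvStep st := by
  cases c with
  | nil => rfl
  | cons x t =>
    have h1 : (((x :: t).length : Int) - 1) = ((t.length : Nat) : Int) := by simp
    rw [h1, PySem.List.pyRange_zero_natCast, pvDiffs_eq_range_map]
    simp only [List.length_cons, Nat.add_sub_cancel]
    rw [List.foldl_map, List.foldl_map]
    rfl

lemma pvFold_some (ds : List Int) (σ : Bool) (ns na : Int) :
    ds.foldl pvStep (some σ, ns, na) =
      (some σ,
       ns + ((ds.filter (fun d => pvIsGood d && (decide (0 < d) != σ))).length : Int),
       na + ((ds.filter (fun d => !pvIsGood d)).length : Int)) := by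
  induction ds generalizing ns na with
  | nil => simp
  | cons d ds ih =>
    by_cases hbad : 3 < d.natAbs ∨ d = 0
    · have hg : pvIsGood d = false := by simp [pvIsGood]; omega
      simp only [List.foldl_cons, pvStep, if_pos hbad, List.filter_cons, hg]
      rw [ih]
      simp
      omega
    · have hg : pvIsGood d = true := by simp [pvIsGood]; omega
      by_cases hm : decide (0 < d) ≠ σ
      · simp only [List.foldl_cons, pvStep, if_neg hbad, if_pos hm, List.filter_cons, hg]
        rw [ih]
        simp [hm]
        omega
      · simp only [List.foldl_cons, pvStep, if_neg hbad, if_neg hm, List.filter_cons, hg]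
        rw [ih]
        simp at hm
        simp [hm]

lemma pvFold_none (ds : List Int) (na : Int) :
    ds.foldl pvStep (none, 0, na) =
      (match ds.filter pvIsGood with
       | [] => ((none : Option Bool), (0 : Int),
                na + ((ds.filter (fun d => !pvIsGood d)).length : Int))
       | g :: gs => (some (decide (0 < g)),
                ((gs.filter (fun d => decide (0 < d) != decide (0 < g))).length : Int),
                na + ((ds.filter (fun d => !pvIsGood d)).length : Int))) := by
  induction ds generalizing na with
  | nil => simp
  | cons d ds ih =>
    by_cases hbad : 3 < d.natAbs ∨ d = 0
    · have hg : pvIsGood d = false := by simp [pvIsGood]; omega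
      simp only [List.foldl_cons, pvStep, if_pos hbad, List.filter_cons, hg]
      rw [ih]
      cases hG : ds.filter pvIsGood <;> simp <;> omega
    · have hg : pvIsGood d = true := by simp [pvIsGood]; omega
      simp only [List.foldl_cons, pvStep, if_neg hbad, List.filter_cons, hg]
      rw [pvFold_some]
      simp [List.filter_filter]
      rw [List.filter_congr (fun x _ => Bool.and_comm _ _)]

-- up and down counts add up to the number of good differences
lemma pvCount_split (ds : List Int) :
    ds.countP pvUpP + ds.countP pvDownP = (ds.filter pvIsGood).length := by
  induction ds with
  | nil => rfl
  | cons d ds ih =>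
    simp only [List.countP_cons, List.filter_cons]
    by_cases hg : pvIsGood d = true
    · have : (pvUpP d = true ∧ pvDownP d = false) ∨ (pvUpP d = false ∧ pvDownP d = true) := by
        simp [pvIsGood] at hg
        simp [pvUpP, pvDownP]
        omega
      rcases this with ⟨h1, h2⟩ | ⟨h1, h2⟩ <;> simp [hg, h1, h2] <;> omega
    · have h1 : pvUpP d = false := by
        simp [pvIsGood] at hg; simp [pvUpP]; omega
      have h2 : pvDownP d = false := by
        simp [pvIsGood] at hg; simp [pvDownP]; omega
      rw [Bool.not_eq_true] at hg
      simp [hg, h1, h2]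
      omega

-- counting up (resp. down) steps over all differences equals counting over the good ones
lemma pvCount_restrict (ds : List Int) (P : Int → Bool) (h : ∀ d, P d = true → pvIsGood d = true) :
    ds.countP P = (ds.filter pvIsGood).countP P := by
  rw [List.countP_filter]
  apply List.countP_congr
  intro d _
  by_cases hp : P d = true
  · simp [hp, h d hp]
  · rw [Bool.not_eq_true] at hp; simp [hp]

lemma pvUp_good : ∀ d, pvUpP d = true → pvIsGood d = true := by
  intro d h; simp [pvUpP] at h; simp [pvIsGood]; omega

lemma pvDown_good : ∀ d, pvDownP d = true → pvIsGood d = true := by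
  intro d h; simp [pvDownP] at h; simp [pvIsGood]; omega

-- on a list of good differences, "only one direction occurs" ⟺ "no difference
-- disagrees in sign with the first one"
lemma pvSign_iff (g : Int) (gs : List Int)
    (hmem : ∀ d ∈ g :: gs, pvIsGood d = true) :
    (((g :: gs).countP pvUpP = 0 ∨ (g :: gs).countP pvDownP = 0))
      ↔ (gs.filter (fun d => decide (0 < d) != decide (0 < g))).length = 0 := by
  have hchar : ∀ d ∈ g :: gs, (pvUpP d = true ↔ 0 < d) ∧ (pvDownP d = true ↔ ¬ 0 < d) := by
    intro d hd
    have := hmem d hd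
    simp [pvIsGood] at this
    simp [pvUpP, pvDownP]
    omega
  simp only [List.countP_eq_zero, List.length_eq_zero_iff, List.filter_eq_nil_iff]
  constructor
  · rintro (h | h) d hd
    · -- no up steps: every element (incl. g) is non-positive
      have hdneg := (hchar d (List.mem_cons_of_mem _ hd)).1
      have hgneg := (hchar g (List.mem_cons_self)).1
      have h1 : ¬ 0 < d := fun hp => h d (List.mem_cons_of_mem _ hd) (hdneg.mpr hp)
      have h2 : ¬ 0 < g := fun hp => h g List.mem_cons_self (hgneg.mpr hp)
      simp [h1, h2]
    · have hdpos := (hchar d (List.mem_cons_of_mem _ hd)).2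
      have hgpos := (hchar g (List.mem_cons_self)).2
      have h1 : 0 < d := by by_contra hn; exact h d (List.mem_cons_of_mem _ hd) (hdpos.mpr hn)
      have h2 : 0 < g := by by_contra hn; exact h g List.mem_cons_self (hgpos.mpr hn)
      simp [h1, h2]
  · intro h
    by_cases hg : 0 < g
    · right
      intro d hd hdown
      rcases List.mem_cons.mp hd with rfl | hd'
      · exact ((hchar d hd).2.mp hdown) hg
      · have := h d hd'
        have hdneg := (hchar d hd).2.mp hdown
        simp [hdneg, hg] at this
    · left
      intro d hd hup
      rcases List.mem_cons.mp hd with rfl | hd'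
      · exact hg ((hchar d hd).1.mp hup)
      · have := h d hd'
        have hdpos := (hchar d hd).1.mp hup
        simp [hdpos, hg] at this

lemma pvMain_eq (c : List Int) : valid_seq2 c = valid_seq2_alt c := by
  rcases c with _ | ⟨x, _ | ⟨y, t⟩⟩
  · rfl
  · rfl
  · set c := x :: y :: t with hc
    have hlen : ¬ c.length ≤ 1 := by simp [hc]
    simp only [valid_seq2, valid_seq2_alt, pvFoldA_eq, if_neg hlen]
    rw [PySem.List.slice_from_one]
    -- rewrite the pair counts as counts over the difference list
    have hup : (c.zip c.tail).countP (fun p => decide (1 ≤ p.2 - p.1 ∧ p.2 - p.1 ≤ 3))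
        = (pvDiffs c).countP pvUpP := by
      rw [pvDiffs, List.countP_map]
      apply List.countP_congr
      intro p _
      simp [pvUpP, Function.comp]
    have hdown : (c.zip c.tail).countP (fun p => decide (-3 ≤ p.2 - p.1 ∧ p.2 - p.1 ≤ -1))
        = (pvDiffs c).countP pvDownP := by
      rw [pvDiffs, List.countP_map]
      apply List.countP_congr
      intro p _
      simp [pvDownP, Function.comp]
    rw [hup, hdown, pvFold_none]
    have hD : (pvDiffs c).length = c.length - 1 := by simp [pvDiffs, hc]
    have hsplit : (pvDiffs c).length
        = ((pvDiffs c).filter pvIsGood).length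
          + ((pvDiffs c).filter (fun d => !pvIsGood d)).length :=
      List.length_eq_length_filter_add pvIsGood
    have hcsplit := pvCount_split (pvDiffs c)
    have hn2 : 2 ≤ c.length := by simp [hc]
    cases hG : (pvDiffs c).filter pvIsGood with
    | nil =>
      rw [hG] at hsplit hcsplit
      simp only [List.length_nil, Nat.zero_add] at hsplit hcsplit
      have hu0 : (pvDiffs c).countP pvUpP = 0 := by omega
      have hd0 : (pvDiffs c).countP pvDownP = 0 := by omega
      rw [hu0, hd0]
      dsimp only
      split_ifs with h1 h2 h3
      · symm
        rw [decide_eq_false_iff_not]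
        rintro ⟨hc1, -⟩
        push_cast at hc1 h1
        omega
      · symm
        rw [decide_eq_true_eq]
        exact ⟨by push_cast; push_cast at h2; omega, Or.inl rfl⟩
      · symm
        rw [decide_eq_false_iff_not]
        rintro ⟨hc1, -⟩
        push_cast at hc1
        exact h2 ⟨by push_cast; omega, rfl⟩
      · exfalso
        rw [not_or] at h3
        have := h3.2
        push_cast at this
        omega
    | cons g gs =>
      rw [hG] at hsplit hcsplit
      have hmem : ∀ d ∈ g :: gs, pvIsGood d = true := by
        intro d hd
        rw [← hG] at hd
        exact (List.mem_filter.mp hd).2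
      have hup0 : (pvDiffs c).countP pvUpP = (g :: gs).countP pvUpP := by
        rw [pvCount_restrict _ _ pvUp_good, hG]
      have hdown0 : (pvDiffs c).countP pvDownP = (g :: gs).countP pvDownP := by
        rw [pvCount_restrict _ _ pvDown_good, hG]
      rw [hup0, hdown0] at hcsplit ⊢
      dsimp only
      have hsign := pvSign_iff g gs hmem
      have hns := List.length_filter_le (fun d => decide (0 < d) != decide (0 < g)) gs
      simp only [List.length_cons] at hsplit hcsplit
      split_ifs with h1 h2 h3
      · -- more than one bad difference: B's count equation fails
        symm
        rw [decide_eq_false_iff_not]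
        rintro ⟨hc1, -⟩
        push_cast at hc1 h1
        omega
      · -- exactly one bad, no sign mismatch: B's test holds
        symm
        rw [decide_eq_true_eq]
        obtain ⟨h21, h22⟩ := h2
        have hs : (gs.filter (fun d => decide (0 < d) != decide (0 < g))).length = 0 := by
          exact_mod_cast h22
        refine ⟨by push_cast; push_cast at h21; omega, ?_⟩
        rcases hsign.mpr hs with h | h
        · exact Or.inl (by exact_mod_cast h)
        · exact Or.inr (by exact_mod_cast h)
      · -- A returns False here; show B's test fails too
        symm
        rw [decide_eq_false_iff_not]
        rintro ⟨hc1, hc2⟩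
        have hUD : (g :: gs).countP pvUpP = 0 ∨ (g :: gs).countP pvDownP = 0 := by
          rcases hc2 with h | h
          · exact Or.inl (by exact_mod_cast h)
          · exact Or.inr (by exact_mod_cast h)
        have hs := hsign.mp hUD
        push_cast at hc1
        exact h2 ⟨by push_cast; omega, by simp [hs]⟩
      · -- unreachable: with no earlier branch taken, num_inc_sign < len(c)-1 always holds
        exfalso
        rw [not_or] at h3
        have := h3.2
        push_cast at this
        omega

-- ===== VERDICT (by name: the statement is the Claim_ definition above) =====
theorem valid_seq2_spec : Claim_equal_valid_seq2 := by
  intro c _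
  exact pvMain_eq c
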